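-- pv_equiv track=rewrite | github.com/dmidem/pushback | pushback.py | parent_dirs_for
-- ===== SOURCE A (Python) =====
-- def parent_dirs_for(pattern: str) -> list[str]:
--     """Generate parent directory paths for rsync traversal"""
--     path = pattern.lstrip("/") if pattern.startswith("/") else pattern
--     parts = [x for x in path.split("/") if x]
--     parents = []
--     current = ""
--
--     for i in range(len(parts) - 1):  # up to parent of final component
--         current = (current + "/" if current else "") + parts[i]
--         parents.append(("/" + current) if pattern.startswith("/") else current)
--
--     return [x + "/" for x in parents]  # explicitly directories
-- ===== SOURCE B (Python) =====
-- def parent_dirs_for(pattern: str) -> list[str]: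
--     """Generate parent directory paths for rsync traversal"""
--     parts = [x for x in pattern.lstrip("/").split("/") if x]
--     prefix = "/" if pattern.startswith("/") else ""
--     return [prefix + "/".join(parts[:i + 1]) + "/" for i in range(len(parts) - 1)]
-- ===== Notes on version B (the rewrite author's own statement) =====
-- stated objective: idiomatic
-- what changed: Replaces the single pass that threads a running accumulator string (and a conditional '/'-gluing on emptiness) with a comprehension that rebuilds each prefix independently by rejoining a slice parts[:i+1].
import Mathlib
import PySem

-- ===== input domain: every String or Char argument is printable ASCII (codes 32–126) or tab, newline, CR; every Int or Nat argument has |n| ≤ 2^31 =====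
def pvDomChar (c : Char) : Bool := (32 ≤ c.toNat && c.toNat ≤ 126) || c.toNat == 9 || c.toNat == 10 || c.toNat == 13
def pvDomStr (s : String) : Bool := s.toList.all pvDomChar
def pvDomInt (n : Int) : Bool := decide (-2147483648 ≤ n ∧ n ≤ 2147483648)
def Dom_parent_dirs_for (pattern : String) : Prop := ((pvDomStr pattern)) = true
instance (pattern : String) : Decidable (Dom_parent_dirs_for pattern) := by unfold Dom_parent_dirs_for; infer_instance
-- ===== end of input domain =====

-- B replaces A's single pass with a running accumulator string by a comprehension that
-- rebuilds each prefix independently by rejoining the slice parts[:i+1] (idiomatic; same cost).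

-- ===== PORT A =====
-- 'pattern.lstrip("/")' ported by hand as dropWhile (· == '/') on the code points (exact: lstrip
-- with an explicit char set removes exactly the maximal leading run of those chars).
def parent_dirs_for (pattern : String) : List String :=
  let pabs : Bool := PySem.Chars.startswith pattern.toList ['/']
  let path : List Char := if pabs then pattern.toList.dropWhile (· == '/') else pattern.toList
  let parts : List (List Char) := (PySem.Chars.splitOn path ['/']).filter (fun x => !x.isEmpty)
  let fin :=
    (PySem.List.pyRange 0 ((parts.length : Int) - 1) 1).foldl
      (fun (st : List (List Char) × List Char) i =>
        let current :=
          (if !st.2.isEmpty then st.2 ++ ['/'] else []) ++ PySem.List.pyGetD parts i []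
        (st.1 ++ [if pabs then '/' :: current else current], current))
      ([], [])
  (fin.1.map (fun x => x ++ ['/'])).map String.ofList

-- ===== PORT B =====
def parent_dirs_for_alt (pattern : String) : List String :=
  let parts : List (List Char) :=
    (PySem.Chars.splitOn (pattern.toList.dropWhile (· == '/')) ['/']).filter (fun x => !x.isEmpty)
  let prefixChars : List Char := if PySem.Chars.startswith pattern.toList ['/'] then ['/'] else []
  ((List.range (parts.length - 1)).map (fun i =>
      prefixChars ++ PySem.Chars.join ['/'] (parts.take (i + 1)) ++ ['/'])).map String.ofList

-- ===== PRECONDITION & SPEC =====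
def Spec_parent_dirs_for (pattern : String) (out : List String) : Prop := out = parent_dirs_for_alt pattern
instance (pattern : String) (out : List String) : Decidable (Spec_parent_dirs_for pattern out) := by unfold Spec_parent_dirs_for; infer_instance

-- ===== CLAIM (what is proved, stated in full; the proofs are below) =====
def Claim_equal_parent_dirs_for : Prop := ∀ (pattern : String), Dom_parent_dirs_for pattern → Spec_parent_dirs_for pattern (parent_dirs_for pattern)

-- ===== LEMMAS AND PROOFS =====

-- lstrip("/") is a no-op on a string that does not start with '/'
lemma dropWhile_of_not_startswith (l : List Char)
    (h : PySem.Chars.startswith l ['/'] = false) : l.dropWhile (· == '/') = l := by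
  cases l with
  | nil => rfl
  | cons c t =>
    have hc : c ≠ '/' := by
      intro hc; subst hc
      have hpre : (['/'] : List Char) <+: ('/' :: t) := ⟨t, rfl⟩
      rw [← PySem.Chars.startswith_iff] at hpre
      rw [hpre] at h; cases h
    simp [hc]

lemma join_snoc (sep a : List Char) (l : List (List Char)) :
    PySem.Chars.join sep (l ++ [a])
      = if l = [] then a else PySem.Chars.join sep l ++ sep ++ a := by
  induction l with
  | nil => simp [PySem.Chars.join_singleton]
  | cons x t ih =>
    cases t with
    | nil => simp [PySem.Chars.join_cons_cons, PySem.Chars.join_singleton]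
    | cons y t' =>
      have : PySem.Chars.join sep ((x :: y :: t') ++ [a])
          = x ++ sep ++ PySem.Chars.join sep ((y :: t') ++ [a]) := by
        simpa using PySem.Chars.join_cons_cons sep x y (t' ++ [a])
      rw [this, ih]
      simp [PySem.Chars.join_cons_cons]

lemma join_ne_nil (sep x : List Char) (t : List (List Char)) (hx : x ≠ []) :
    PySem.Chars.join sep (x :: t) ≠ [] := by
  cases t with
  | nil => simpa [PySem.Chars.join_singleton] using hx
  | cons y t' =>
    rw [PySem.Chars.join_cons_cons]
    simp [hx]

-- the loop invariant: after m iterations, current = '/'.join(parts[:m]) and the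
-- accumulated parents are the independently-rebuilt prefixes
lemma loop_inv (parts : List (List Char)) (pabs : Bool)
    (hne : ∀ x ∈ parts, x ≠ []) (m : Nat) (hm : m ≤ parts.length) :
    (List.range m).foldl
      (fun (st : List (List Char) × List Char) (k : Nat) =>
        let current :=
          (if !st.2.isEmpty then st.2 ++ ['/'] else []) ++ PySem.List.pyGetD parts (k : Int) []
        (st.1 ++ [if pabs then '/' :: current else current], current))
      ([], [])
    = ((List.range m).map (fun i =>
          let c := PySem.Chars.join ['/'] (parts.take (i + 1))
          if pabs then '/' :: c else c),
       PySem.Chars.join ['/'] (parts.take m)) := by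
  induction m with
  | zero => simp [PySem.Chars.join_nil]
  | succ k ih =>
    have hk : k < parts.length := by omega
    rw [List.range_succ, List.foldl_append, List.map_append,
        ih (by omega), List.foldl_cons, List.foldl_nil]
    have hget : PySem.List.pyGetD parts (k : Int) [] = parts[k] := by
      simp [PySem.List.pyGetD_eq_getElem parts (k : Int) [] (by omega),
            List.getElem?_eq_getElem hk]
    have htake : parts.take (k + 1) = parts.take k ++ [parts[k]] := by
      rw [List.take_add_one, List.getElem?_eq_getElem hk]; rfl
    have hjoin : PySem.Chars.join ['/'] (parts.take (k + 1))
        = (if !(PySem.Chars.join ['/'] (parts.take k)).isEmpty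
            then PySem.Chars.join ['/'] (parts.take k) ++ ['/'] else []) ++ parts[k] := by
      rw [htake, join_snoc]
      rcases Nat.eq_zero_or_pos k with hk0 | hk0
      · subst hk0; simp [PySem.Chars.join_nil]
      · have hkne : parts.take k ≠ [] := by
          have : (parts.take k).length = k := by simp; omega
          intro h; rw [h] at this; simp at this; omega
        obtain ⟨x, t, hxt⟩ := List.exists_cons_of_ne_nil hkne
        have hxmem : x ∈ parts := by
          have : x ∈ parts.take k := by rw [hxt]; exact List.mem_cons_self
          exact List.mem_of_mem_take this
        have hjne : PySem.Chars.join ['/'] (parts.take k) ≠ [] := by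
          rw [hxt]; exact join_ne_nil _ _ _ (hne x hxmem)
        simp [hkne, List.isEmpty_eq_false_iff.mpr hjne]
    simp only [hget]
    refine Prod.ext ?_ ?_
    · simp only [List.map_cons, List.map_nil]
      congr 1
      congr 1
      simp [hjoin]
    · simpa using hjoin.symm

lemma ports_agree (pattern : String) :
    parent_dirs_for pattern = parent_dirs_for_alt pattern := by
  unfold parent_dirs_for parent_dirs_for_alt
  dsimp only
  set pabs := PySem.Chars.startswith pattern.toList ['/'] with hpabs
  have hpath : (if pabs then pattern.toList.dropWhile (· == '/') else pattern.toList)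
      = pattern.toList.dropWhile (· == '/') := by
    cases h : pabs with
    | true => simp
    | false => simp [dropWhile_of_not_startswith pattern.toList h]
  rw [hpath]
  set parts := (PySem.Chars.splitOn (pattern.toList.dropWhile (· == '/')) ['/']).filter
      (fun x => !x.isEmpty) with hparts
  have hne : ∀ x ∈ parts, x ≠ [] := by
    intro x hx
    have := List.of_mem_filter hx
    simpa [List.isEmpty_iff] using this
  have hrange : PySem.List.pyRange 0 ((parts.length : Int) - 1) 1
      = (List.range (parts.length - 1)).map (fun k : Nat => (k : Int)) := by
    rw [PySem.List.pyRange_one]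
    have : ((parts.length : Int) - 1 - 0).toNat = parts.length - 1 := by omega
    rw [this]
    simp
  rw [hrange, List.foldl_map]
  rw [loop_inv parts pabs hne (parts.length - 1) (by omega)]
  simp only [List.map_map]
  congr 1
  funext i
  cases h : pabs <;> simp

-- ===== VERDICT (by name: the statement is the Claim_ definition above) =====
theorem parent_dirs_for_spec : Claim_equal_parent_dirs_for := by
  intro pattern _
  exact ports_agree pattern
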